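-- pv_equiv track=rewrite | github.com/Ola-je/a2sv | a2sv/week1/leetcode/count-good-numbers.py | countGoodNumbers
-- ===== SOURCE A (Python) =====
-- def countGoodNumbers(n: int) -> int:
--     mod = 10**9 + 7
--     def mypow(base,exponent):
--         ans = 1
--         while exponent > 0:
--             if exponent%2==1:
--                 ans =(ans *base)%mod
--             base = (base*base)%mod
--             exponent//=2
--         return ans
--     even = mypow(5, n//2 + n%2)
--     odd = mypow(4, n//2)
--
--     return (even*odd)%mod
-- ===== SOURCE B (Python) =====
-- MOD = 10**9 + 7
--
-- def _powmod(b, e):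
--     # recursive exponentiation by squaring mod MOD
--     if e <= 0:
--         return 1
--     h = _powmod(b, e // 2)
--     h = h * h % MOD
--     return h * b % MOD if e % 2 == 1 else h
--
-- def countGoodNumbers(n: int) -> int:
--     # an even position admits five digits and an odd one four, so each
--     # adjacent pair contributes their product; a trailing even position
--     # (odd n) contributes five more
--     pairs = _powmod(20, n // 2)
--     return pairs * 5 % MOD if n % 2 == 1 else pairs
-- ===== Notes on version B (the rewrite author's own statement) =====
-- stated objective: alternative
-- what changed: Instead of A's two modular exponentiations 5^(ceil(n/2)) and 4^(floor(n/2)) via an iterative bit-scanning loop, B computes a single power 20^(n//2) by recursive exponentiation by squaring (each even/odd position pair contributes 5*4=20 choices) and multiplies by 5 once when n is odd.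
-- outside the precondition, e.g. on countGoodNumbers(-1): A returns 1, B returns 5
import Mathlib
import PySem

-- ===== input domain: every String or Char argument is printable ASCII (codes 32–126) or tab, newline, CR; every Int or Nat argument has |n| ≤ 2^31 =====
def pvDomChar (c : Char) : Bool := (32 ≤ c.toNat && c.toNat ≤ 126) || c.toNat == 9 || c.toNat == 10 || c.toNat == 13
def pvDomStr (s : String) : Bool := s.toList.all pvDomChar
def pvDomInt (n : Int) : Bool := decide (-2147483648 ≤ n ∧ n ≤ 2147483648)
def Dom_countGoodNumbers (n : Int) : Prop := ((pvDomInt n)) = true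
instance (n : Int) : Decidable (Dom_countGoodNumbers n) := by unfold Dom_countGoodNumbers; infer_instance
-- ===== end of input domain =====

-- B folds A's two per-parity exponentiations into a single power computed by recursive squaring (alternative decomposition, same cost).

-- ===== PORT A =====
-- A's inner `mypow`: iterative binary exponentiation; the while-loop state (base, exponent, ans).
def mypowA (base exponent ans : Int) : Int :=
  if 0 < exponent then
    mypowA (PySem.Int.mod (base * base) 1000000007)
      (PySem.Int.floordiv exponent 2)
      (if PySem.Int.mod exponent 2 = 1 then PySem.Int.mod (ans * base) 1000000007 else ans)
  else ans
termination_by exponent.toNat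
decreasing_by
  simp only [PySem.Int.floordiv_eq_ediv_of_pos (by norm_num : (0:Int) < 2)]
  omega

def countGoodNumbers (n : Int) : Int :=
  let even := mypowA 5 (PySem.Int.floordiv n 2 + PySem.Int.mod n 2) 1
  let odd := mypowA 4 (PySem.Int.floordiv n 2) 1
  PySem.Int.mod (even * odd) 1000000007

-- ===== PORT B =====
-- B's `_powmod`: recursive exponentiation by squaring.
def powmodB (b e : Int) : Int :=
  if e ≤ 0 then 1
  else
    let h := powmodB b (PySem.Int.floordiv e 2)
    let h2 := PySem.Int.mod (h * h) 1000000007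
    if PySem.Int.mod e 2 = 1 then PySem.Int.mod (h2 * b) 1000000007 else h2
termination_by e.toNat
decreasing_by
  simp only [PySem.Int.floordiv_eq_ediv_of_pos (by norm_num : (0:Int) < 2)]
  omega

def countGoodNumbers_alt (n : Int) : Int :=
  let pairs := powmodB 20 (PySem.Int.floordiv n 2)
  if PySem.Int.mod n 2 = 1 then PySem.Int.mod (pairs * 5) 1000000007 else pairs

-- ===== PRECONDITION & SPEC =====
-- Pre_ restricts to the task's natural domain: n is the length of a digit string, so 0 ≤ n.
def Pre_countGoodNumbers (n : Int) : Prop := 0 ≤ n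
instance (n : Int) : Decidable (Pre_countGoodNumbers n) := by unfold Pre_countGoodNumbers; infer_instance
def pvWitness_countGoodNumbers : Int := 7

def Spec_countGoodNumbers (n : Int) (out : Int) : Prop := out = countGoodNumbers_alt n
instance (n : Int) (out : Int) : Decidable (Spec_countGoodNumbers n out) := by unfold Spec_countGoodNumbers; infer_instance

-- ===== CLAIM (what is proved, stated in full; the proofs are below) =====
def Claim_equal_countGoodNumbers : Prop :=
  ∀ (n : Int), Dom_countGoodNumbers n → Pre_countGoodNumbers n → Spec_countGoodNumbers n (countGoodNumbers n)

-- ===== LEMMAS AND PROOFS =====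

theorem mypowA_eq : ∀ (k : Nat) (b e ans : Int), e.toNat = k → 0 < e →
    mypowA b e ans = (ans * b ^ e.toNat) % 1000000007 := by
  intro k
  induction k using Nat.strong_induction_on with
  | _ k ih =>
    intro b e ans hk he
    have h2 : (0:Int) < 2 := by norm_num
    have hM : (0:Int) < 1000000007 := by norm_num
    rw [mypowA]
    simp only [if_pos he, PySem.Int.mod_eq_emod_of_pos h2, PySem.Int.mod_eq_emod_of_pos hM,
      PySem.Int.floordiv_eq_ediv_of_pos h2]
    by_cases hh : 0 < e / 2
    · rw [ih (e / 2).toNat (by omega) (b * b % 1000000007) (e / 2) _ rfl hh]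
      have c2 : Int.ModEq 1000000007 ((b * b) % 1000000007) (b * b) :=
        Int.emod_emod_of_dvd _ dvd_rfl
      by_cases hodd : e % 2 = 1
      · simp only [if_pos hodd]
        have c1 : Int.ModEq 1000000007 ((ans * b) % 1000000007) (ans * b) :=
          Int.emod_emod_of_dvd _ dvd_rfl
        have c3 := c1.mul (c2.pow (e / 2).toNat)
        calc ((ans * b) % 1000000007 * ((b * b) % 1000000007) ^ (e / 2).toNat) % 1000000007
            = ((ans * b) * (b * b) ^ (e / 2).toNat) % 1000000007 := c3
          _ = (ans * b ^ e.toNat) % 1000000007 := by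
              have hsplit : e.toNat = 2 * (e / 2).toNat + 1 := by omega
              rw [hsplit, pow_add, pow_mul, pow_one]; ring_nf
      · simp only [if_neg hodd]
        have c3 := (Int.ModEq.refl ans).mul (c2.pow (e / 2).toNat)
        calc (ans * ((b * b) % 1000000007) ^ (e / 2).toNat) % 1000000007
            = (ans * (b * b) ^ (e / 2).toNat) % 1000000007 := c3
          _ = (ans * b ^ e.toNat) % 1000000007 := by
              have hsplit : e.toNat = 2 * (e / 2).toNat := by omega
              rw [hsplit, pow_mul]; ring_nf
    · have he1 : e = 1 := by omega
      subst he1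
      rw [mypowA]
      norm_num

-- closed form for A's mypow on all nonnegative exponents (e = 0 gives 1 = b^0 % M)
theorem mypowA_closed (b e : Int) (he : 0 ≤ e) :
    mypowA b e 1 = b ^ e.toNat % 1000000007 := by
  by_cases h : 0 < e
  · rw [mypowA_eq e.toNat b e 1 rfl h, one_mul]
  · have : e = 0 := by omega
    subst this
    rw [mypowA]; norm_num

theorem powmodB_closed (b : Int) : ∀ (k : Nat) (e : Int), e.toNat = k → 0 ≤ e →
    powmodB b e = b ^ e.toNat % 1000000007 := by
  intro k
  induction k using Nat.strong_induction_on with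
  | _ k ih =>
    intro e hk he
    have h2 : (0:Int) < 2 := by norm_num
    have hM : (0:Int) < 1000000007 := by norm_num
    rw [powmodB]
    by_cases he0 : e ≤ 0
    · have : e = 0 := by omega
      subst this; norm_num
    simp only [if_neg he0, PySem.Int.mod_eq_emod_of_pos h2,
      PySem.Int.mod_eq_emod_of_pos hM, PySem.Int.floordiv_eq_ediv_of_pos h2]
    rw [ih (e / 2).toNat (by omega) (e / 2) rfl (by omega)]
    have chf : Int.ModEq 1000000007 (b ^ (e / 2).toNat % 1000000007) (b ^ (e / 2).toNat) :=
      Int.emod_emod_of_dvd _ dvd_rfl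
    have csq : Int.ModEq 1000000007
        ((b ^ (e / 2).toNat % 1000000007 * (b ^ (e / 2).toNat % 1000000007)) % 1000000007)
        (b ^ (e / 2).toNat * b ^ (e / 2).toNat) :=
      (Int.emod_emod_of_dvd _ dvd_rfl).trans (chf.mul chf)
    by_cases hodd : e % 2 = 1
    · simp only [if_pos hodd]
      have c3 := csq.mul (Int.ModEq.refl b)
      calc ((b ^ (e / 2).toNat % 1000000007 * (b ^ (e / 2).toNat % 1000000007)) % 1000000007 * b)
            % 1000000007
          = ((b ^ (e / 2).toNat * b ^ (e / 2).toNat) * b) % 1000000007 := c3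
        _ = b ^ e.toNat % 1000000007 := by
            have hsplit : e.toNat = (e / 2).toNat + (e / 2).toNat + 1 := by omega
            rw [hsplit, pow_add, pow_add, pow_one]
    · simp only [if_neg hodd]
      calc (b ^ (e / 2).toNat % 1000000007 * (b ^ (e / 2).toNat % 1000000007)) % 1000000007
          = (b ^ (e / 2).toNat * b ^ (e / 2).toNat) % 1000000007 := chf.mul chf
        _ = b ^ e.toNat % 1000000007 := by
            have hsplit : e.toNat = (e / 2).toNat + (e / 2).toNat := by omega
            rw [hsplit, pow_add]

-- ===== VERDICT (by name: the statement is the Claim_ definition above) =====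
theorem countGoodNumbers_spec : Claim_equal_countGoodNumbers := by
  intro n _ hn
  have hn0 : (0:Int) ≤ n := hn
  show _ = _
  unfold countGoodNumbers countGoodNumbers_alt
  have h2 : (0:Int) < 2 := by norm_num
  have hM : (0:Int) < 1000000007 := by norm_num
  have hk : 0 ≤ n / 2 := by omega
  simp only [PySem.Int.mod_eq_emod_of_pos h2, PySem.Int.mod_eq_emod_of_pos hM,
    PySem.Int.floordiv_eq_ediv_of_pos h2]
  rw [mypowA_closed 5 (n / 2 + n % 2) (by omega), mypowA_closed 4 (n / 2) hk,
    powmodB_closed 20 (n / 2).toNat (n / 2) rfl hk]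
  set k := (n / 2).toNat with hkdef
  have h20 : (20 : Int) ^ k = 5 ^ k * 4 ^ k := by
    rw [← mul_pow]; norm_num
  have e2 : Int.ModEq 1000000007 ((4:Int) ^ k % 1000000007) (4 ^ k) :=
    Int.emod_emod_of_dvd _ dvd_rfl
  have e3 : Int.ModEq 1000000007 ((20:Int) ^ k % 1000000007) (20 ^ k) :=
    Int.emod_emod_of_dvd _ dvd_rfl
  by_cases hodd : n % 2 = 1
  · simp only [if_pos hodd]
    have ha : (n / 2 + n % 2).toNat = k + 1 := by omega
    have e1 : Int.ModEq 1000000007 ((5:Int) ^ (k + 1) % 1000000007) (5 ^ (k + 1)) :=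
      Int.emod_emod_of_dvd _ dvd_rfl
    have heq : (5:Int) ^ (k + 1) * 4 ^ k = 20 ^ k * 5 := by
      rw [h20, pow_succ]; ring
    have l : Int.ModEq 1000000007
        ((5 ^ (k + 1) % 1000000007) * (4 ^ k % 1000000007))
        ((20 : Int) ^ k % 1000000007 * 5) :=
      (e1.mul e2).trans (by rw [heq]; exact e3.symm.mul_right 5)
    rw [ha]; exact l
  · simp only [if_neg hodd]
    have ha : (n / 2 + n % 2).toNat = k := by omega
    have e1 : Int.ModEq 1000000007 ((5:Int) ^ k % 1000000007) (5 ^ k) :=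
      Int.emod_emod_of_dvd _ dvd_rfl
    have l : Int.ModEq 1000000007
        ((5 ^ k % 1000000007) * (4 ^ k % 1000000007)) ((20 : Int) ^ k) :=
      (e1.mul e2).trans (by rw [h20])
    rw [ha]; exact l
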